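-- pv_equiv track=rewrite | github.com/Dirty13itch/athanor | projects/agents/src/athanor_agents/provider_execution.py | _provider_handoff_counts
-- ===== SOURCE A (Python) =====
-- from typing import Any
--
-- def _provider_handoff_counts(handoffs: list[dict[str, Any]]) -> dict[str, int]:
--     counts = {
--         "pending_handoffs": 0,
--         "completed_handoffs": 0,
--         "failed_handoffs": 0,
--         "fallback_handoffs": 0,
--         "direct_execution_count": 0,
--         "handoff_bundle_count": 0,
--     }
--     for handoff in handoffs:
--         status = str(handoff.get("status") or "pending")
--         if status == "pending":
--             counts["pending_handoffs"] += 1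
--         elif status == "completed":
--             counts["completed_handoffs"] += 1
--         elif status == "failed":
--             counts["failed_handoffs"] += 1
--
--         execution_mode = str(handoff.get("execution_mode") or "")
--         if execution_mode in {"bridge_cli", "direct_cli"}:
--             counts["direct_execution_count"] += 1
--         if execution_mode == "handoff_bundle":
--             counts["handoff_bundle_count"] += 1
--         if handoff.get("fallback_from_execution_mode"):
--             counts["fallback_handoffs"] += 1
--     return counts
-- ===== SOURCE B (Python) =====
-- def _provider_handoff_counts(handoffs):
--     statuses = [str(h.get("status") or "pending") for h in handoffs]
--     modes = [str(h.get("execution_mode") or "") for h in handoffs]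
--     return {
--         "pending_handoffs": statuses.count("pending"),
--         "completed_handoffs": statuses.count("completed"),
--         "failed_handoffs": statuses.count("failed"),
--         "fallback_handoffs": sum(1 for h in handoffs if h.get("fallback_from_execution_mode")),
--         "direct_execution_count": modes.count("bridge_cli") + modes.count("direct_cli"),
--         "handoff_bundle_count": modes.count("handoff_bundle"),
--     }
-- ===== Notes on version B (the rewrite author's own statement) =====
-- stated objective: idiomatic
-- what changed: Replaces the single loop that mutates six counters in a dict with projection of the normalized status/mode sequences followed by direct .count lookups assembled into the result dict.
import Mathlib
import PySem

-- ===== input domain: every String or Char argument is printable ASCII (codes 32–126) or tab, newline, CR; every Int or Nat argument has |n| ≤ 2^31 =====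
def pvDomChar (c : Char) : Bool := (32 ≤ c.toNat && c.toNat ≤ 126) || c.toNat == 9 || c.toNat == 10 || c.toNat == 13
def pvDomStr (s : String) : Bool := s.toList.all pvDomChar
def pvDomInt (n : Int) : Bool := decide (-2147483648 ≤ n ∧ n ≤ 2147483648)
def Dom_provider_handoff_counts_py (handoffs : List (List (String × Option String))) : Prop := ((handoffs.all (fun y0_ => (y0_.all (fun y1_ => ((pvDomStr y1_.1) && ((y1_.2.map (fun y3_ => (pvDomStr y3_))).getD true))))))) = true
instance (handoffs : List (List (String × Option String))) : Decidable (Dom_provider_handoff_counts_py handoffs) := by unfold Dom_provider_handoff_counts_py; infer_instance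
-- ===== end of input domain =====

-- B replaces A's single dict-mutating loop by normalizing the status/mode sequences once and
-- assembling the result from direct .count lookups (idiomatic; same return value).

-- ===== PORT A =====
-- str(handoff.get("status") or "pending"): missing key, None value or "" give "pending"
def pvStatus (h : List (String × Option String)) : String :=
  match (PySem.Dict.mk h).get? "status" with
  | some (some s) => if s == "" then "pending" else s
  | _ => "pending"

-- str(handoff.get("execution_mode") or ""): missing key, None value or "" give ""
def pvMode (h : List (String × Option String)) : String :=
  match (PySem.Dict.mk h).get? "execution_mode" with
  | some (some s) => s
  | _ => ""

-- truthiness of handoff.get("fallback_from_execution_mode"): a non-empty string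
def pvFallback (h : List (String × Option String)) : Bool :=
  match (PySem.Dict.mk h).get? "fallback_from_execution_mode" with
  | some (some s) => s != ""
  | _ => false

-- the body of A's for-loop (counts["k"] += 1 as insert of getD+1 at an existing key)
def pvStepA (counts : PySem.Dict String Int) (h : List (String × Option String)) : PySem.Dict String Int :=
  let status := pvStatus h
  let counts :=
    if status == "pending" then counts.insert "pending_handoffs" (counts.getD "pending_handoffs" 0 + 1)
    else if status == "completed" then counts.insert "completed_handoffs" (counts.getD "completed_handoffs" 0 + 1)
    else if status == "failed" then counts.insert "failed_handoffs" (counts.getD "failed_handoffs" 0 + 1)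
    else counts
  let execution_mode := pvMode h
  let counts :=
    if execution_mode == "bridge_cli" || execution_mode == "direct_cli" then
      counts.insert "direct_execution_count" (counts.getD "direct_execution_count" 0 + 1)
    else counts
  let counts :=
    if execution_mode == "handoff_bundle" then
      counts.insert "handoff_bundle_count" (counts.getD "handoff_bundle_count" 0 + 1)
    else counts
  if pvFallback h then counts.insert "fallback_handoffs" (counts.getD "fallback_handoffs" 0 + 1)
  else counts

def provider_handoff_counts_py (handoffs : List (List (String × Option String))) : List (String × Int) :=
  let counts : PySem.Dict String Int := PySem.Dict.mk
    [("pending_handoffs", 0), ("completed_handoffs", 0), ("failed_handoffs", 0),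
     ("fallback_handoffs", 0), ("direct_execution_count", 0), ("handoff_bundle_count", 0)]
  (handoffs.foldl pvStepA counts).items

-- ===== PORT B =====
def provider_handoff_counts_py_alt (handoffs : List (List (String × Option String))) : List (String × Int) :=
  let statuses := handoffs.map pvStatus
  let modes := handoffs.map pvMode
  [("pending_handoffs", (statuses.count "pending" : Int)),
   ("completed_handoffs", (statuses.count "completed" : Int)),
   ("failed_handoffs", (statuses.count "failed" : Int)),
   ("fallback_handoffs", (handoffs.countP (fun h => pvFallback h) : Int)),
   ("direct_execution_count", (modes.count "bridge_cli" : Int) + (modes.count "direct_cli" : Int)),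
   ("handoff_bundle_count", (modes.count "handoff_bundle" : Int))]

-- ===== PRECONDITION & SPEC =====
def Spec_provider_handoff_counts_py (handoffs : List (List (String × Option String))) (out : List (String × Int)) : Prop := out = provider_handoff_counts_py_alt handoffs
instance (handoffs : List (List (String × Option String))) (out : List (String × Int)) : Decidable (Spec_provider_handoff_counts_py handoffs out) := by unfold Spec_provider_handoff_counts_py; infer_instance

-- ===== CLAIM (what is proved, stated in full; the proofs are below) =====
def Claim_equal_provider_handoff_counts_py : Prop := ∀ (handoffs : List (List (String × Option String))), Dom_provider_handoff_counts_py handoffs → Spec_provider_handoff_counts_py handoffs (provider_handoff_counts_py handoffs)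

-- ===== LEMMAS AND PROOFS =====

-- A's loop from an arbitrary 6-value state adds the per-key tallies B reads off directly.
theorem pv_loopA (hs : List (List (String × Option String))) (p c f fb de hb : Int) :
    hs.foldl pvStepA (PySem.Dict.mk
      [("pending_handoffs", p), ("completed_handoffs", c), ("failed_handoffs", f),
       ("fallback_handoffs", fb), ("direct_execution_count", de), ("handoff_bundle_count", hb)]) =
    PySem.Dict.mk
      [("pending_handoffs", p + ((hs.map pvStatus).count "pending" : Int)),
       ("completed_handoffs", c + ((hs.map pvStatus).count "completed" : Int)),
       ("failed_handoffs", f + ((hs.map pvStatus).count "failed" : Int)),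
       ("fallback_handoffs", fb + (hs.countP (fun h => pvFallback h) : Int)),
       ("direct_execution_count", de + ((hs.map pvMode).count "bridge_cli" : Int) + ((hs.map pvMode).count "direct_cli" : Int)),
       ("handoff_bundle_count", hb + ((hs.map pvMode).count "handoff_bundle" : Int))] := by
  induction hs generalizing p c f fb de hb with
  | nil => simp
  | cons h t ih =>
    simp only [List.foldl_cons]
    have hstep : pvStepA (PySem.Dict.mk
        [("pending_handoffs", p), ("completed_handoffs", c), ("failed_handoffs", f),
         ("fallback_handoffs", fb), ("direct_execution_count", de), ("handoff_bundle_count", hb)]) h =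
      PySem.Dict.mk
        [("pending_handoffs", p + (if pvStatus h == "pending" then 1 else 0)),
         ("completed_handoffs", c + (if pvStatus h == "completed" then 1 else 0)),
         ("failed_handoffs", f + (if pvStatus h == "failed" then 1 else 0)),
         ("fallback_handoffs", fb + (if pvFallback h then 1 else 0)),
         ("direct_execution_count", de + (if pvMode h == "bridge_cli" || pvMode h == "direct_cli" then 1 else 0)),
         ("handoff_bundle_count", hb + (if pvMode h == "handoff_bundle" then 1 else 0))] := by
      unfold pvStepA
      split_ifs <;>
        simp_all [PySem.Dict.insert, PySem.Dict.getD, PySem.Dict.get?, PySem.Dict.contains]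
    rw [hstep, ih]
    simp only [List.map_cons, List.count_cons, List.countP_cons, PySem.Dict.mk.injEq,
      List.cons.injEq, Prod.mk.injEq, true_and, and_true]
    refine ⟨?_, ?_, ?_, ?_, ?_, ?_⟩ <;>
      (split_ifs <;> first | (push_cast; omega) | simp_all)

-- ===== VERDICT (by name: the statement is the Claim_ definition above) =====
theorem provider_handoff_counts_py_spec : Claim_equal_provider_handoff_counts_py := by
  intro handoffs _
  unfold Spec_provider_handoff_counts_py
  simp only [provider_handoff_counts_py, provider_handoff_counts_py_alt]
  rw [pv_loopA]
  simp
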